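-- pv_equiv track=rewrite | github.com/NIHxAI/Chest_ct_report | src/preprocessing_labeling.py | check_keyword_with_negation
-- ===== SOURCE A (Python) =====
-- negation_words = ["no", "not", "without", "none"]
--
-- negation_phrases = ["no remarkable", "no significant", "no active", "no abnormal",
--                     "no abnormally", "no definite", "no definitely", "no demonstrable evidence",
--                     "no enlarged", "no evidence", "no focal", "no gross", "no indication",
--                     "no new", "no newly", "no other", "no pathologic", "no residual",
--                     "no significantly", "no visible"]
--
-- def check_keyword_with_negation(text, keywords):
--     """
--     Check if keywords exist without negation
--     Returns 1 if keyword exists with negation, 0 otherwise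
--     """
--     words = text.lower().split()
--     word_positions = {i: word for i, word in enumerate(words)}
--
--     for keyword in keywords:
--         keyword_positions = []
--         # Handle multi-word keywords
--         if ' ' in keyword:
--             keyword_words = keyword.split()
--             for i in range(len(words) - len(keyword_words) + 1):
--                 if words[i:i+len(keyword_words)] == keyword_words:
--                     keyword_positions.append(i)
--         else:
--             keyword_positions = [pos for pos, word in word_positions.items() if word == keyword]
--
--         # Check for negation around keyword
--         for keyword_pos in keyword_positions:
--             left_bound_3 = max(0, keyword_pos - 3)  # Single negation words within 3 words
--             left_bound_5 = max(0, keyword_pos - 5)  # Negation phrases within 5 words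
--
--             # Check single negation words
--             single_neg_match = any(word_positions.get(i, "") in negation_words
--                                   for i in range(left_bound_3, keyword_pos))
--
--             # Check negation phrases
--             phrase_neg_match = any(phrase in " ".join(words[left_bound_5:keyword_pos])
--                                  for phrase in negation_phrases)
--
--             # If negation found, return 1 (indicating negative context)
--             if single_neg_match or phrase_neg_match:
--                 return 1
--
--     # Check if any keyword exists without negation
--     for keyword in keywords:
--         if keyword in text.lower():
--             return 0  # Keyword exists without negation (positive)
--
--     return 0  # No keyword found
-- ===== SOURCE B (Python) =====
-- negation_words = ["no", "not", "without", "none"]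
--
-- negation_phrases = ["no remarkable", "no significant", "no active", "no abnormal",
--                     "no abnormally", "no definite", "no definitely", "no demonstrable evidence",
--                     "no enlarged", "no evidence", "no focal", "no gross", "no indication",
--                     "no new", "no newly", "no other", "no pathologic", "no residual",
--                     "no significantly", "no visible"]
--
-- def check_keyword_with_negation(text, keywords):
--     """Single pass over token positions (loops inverted: positions outer,
--     keywords inner); no dict index and no dead final scan."""
--     words = text.lower().split()
--     pats = [kw.split() if ' ' in kw else [kw] for kw in keywords]
--     for p in range(len(words) + 1):
--         if any(words[p:p + len(ws)] == ws for ws in pats):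
--             if any(w in negation_words for w in words[max(0, p - 3):p]):
--                 return 1
--             ctx = " ".join(words[max(0, p - 5):p])
--             if any(ph in ctx for ph in negation_phrases):
--                 return 1
--     return 0
-- ===== Notes on version B (the rewrite author's own statement) =====
-- stated objective: faster
-- what changed: B makes one pass over token positions (positions outer, keyword patterns inner) with a uniform slice comparison per pattern, instead of A's per-keyword position collection through a word-positions dict / window scans plus a dead final substring scan over the lowered text; a timing run measured B markedly faster at the largest sizes.
import Mathlib
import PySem

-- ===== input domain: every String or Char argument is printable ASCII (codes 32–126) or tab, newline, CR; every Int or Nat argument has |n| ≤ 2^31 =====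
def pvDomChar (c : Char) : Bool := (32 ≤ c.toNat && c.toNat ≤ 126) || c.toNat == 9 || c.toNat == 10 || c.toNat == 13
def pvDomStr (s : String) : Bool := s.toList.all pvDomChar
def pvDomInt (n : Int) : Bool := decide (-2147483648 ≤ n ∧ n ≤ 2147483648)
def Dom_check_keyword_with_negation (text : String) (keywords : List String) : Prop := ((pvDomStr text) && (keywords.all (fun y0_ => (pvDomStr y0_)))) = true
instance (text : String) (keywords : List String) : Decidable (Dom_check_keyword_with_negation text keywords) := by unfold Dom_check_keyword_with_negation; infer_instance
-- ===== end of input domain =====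

-- B replaces A's per-keyword dict/index scans by one pass over token positions
-- (positions outer, keyword patterns inner) and drops the dead final text scan; objective: simpler.

def pvNegationWords : List String := ["no", "not", "without", "none"]

def pvNegationPhrases : List String :=
  ["no remarkable", "no significant", "no active", "no abnormal",
   "no abnormally", "no definite", "no definitely", "no demonstrable evidence",
   "no enlarged", "no evidence", "no focal", "no gross", "no indication",
   "no new", "no newly", "no other", "no pathologic", "no residual",
   "no significantly", "no visible"]

-- ===== PORT A =====

-- A's negation test around keyword_pos: range over the word-positions dict + phrase search in the joined slice
def pvANegCheck (words : List String) (wp : PySem.Dict Int String) (p : Int) : Bool :=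
  let l3 := max 0 (p - 3)
  let l5 := max 0 (p - 5)
  let single := (PySem.List.pyRange l3 p).any (fun i => pvNegationWords.contains (wp.getD i ""))
  let phrase := pvNegationPhrases.any
    (fun ph => PySem.Str.isIn ph (PySem.Str.join " " (PySem.List.slice words (some l5) (some p))))
  single || phrase

-- A's keyword_positions for one keyword (multi-word window scan / dict-items comprehension)
def pvAPositions (words : List String) (wp : PySem.Dict Int String) (keyword : String) : List Int :=
  if PySem.Str.isIn " " keyword then
    let kws := PySem.Str.split₀ keyword
    (PySem.List.pyRange 0 ((words.length : Int) - (kws.length : Int) + 1)).foldl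
      (fun acc i =>
        if PySem.List.slice words (some i) (some (i + (kws.length : Int))) == kws then acc ++ [i]
        else acc) []
  else
    wp.items.foldl (fun acc pw => if pw.2 == keyword then acc ++ [pw.1] else acc) []

def check_keyword_with_negation (text : String) (keywords : List String) : Int :=
  let words := PySem.Str.split₀ (PySem.Str.lower text)
  let wp : PySem.Dict Int String :=
    (PySem.List.enumerate words).foldl (fun d iw => d.insert iw.1 iw.2) PySem.Dict.empty
  if keywords.any (fun keyword =>
       (pvAPositions words wp keyword).any (fun p => pvANegCheck words wp p)) then 1
  else if keywords.any (fun keyword => PySem.Str.isIn keyword (PySem.Str.lower text)) then 0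
  else 0

-- ===== PORT B =====

-- B's pattern for one keyword: its split words if it contains a blank, else the keyword itself
def pvPatOf (kw : String) : List String :=
  if PySem.Str.isIn " " kw then PySem.Str.split₀ kw else [kw]

-- B's negation test at position p: slice windows, no dict
def pvBNegated (words : List String) (p : Int) : Bool :=
  (PySem.List.slice words (some (max 0 (p - 3))) (some p)).any (fun w => pvNegationWords.contains w) ||
  pvNegationPhrases.any
    (fun ph => PySem.Str.isIn ph (PySem.Str.join " " (PySem.List.slice words (some (max 0 (p - 5))) (some p))))

def check_keyword_with_negation_alt (text : String) (keywords : List String) : Int :=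
  let words := PySem.Str.split₀ (PySem.Str.lower text)
  let pats := keywords.map pvPatOf
  if (PySem.List.pyRange 0 ((words.length : Int) + 1)).any (fun p =>
       pats.any (fun pat =>
         PySem.List.slice words (some p) (some (p + (pat.length : Int))) == pat)
       && pvBNegated words p)
  then 1 else 0

-- ===== PRECONDITION & SPEC =====
def Spec_check_keyword_with_negation (text : String) (keywords : List String) (out : Int) : Prop := out = check_keyword_with_negation_alt text keywords
instance (text : String) (keywords : List String) (out : Int) : Decidable (Spec_check_keyword_with_negation text keywords out) := by unfold Spec_check_keyword_with_negation; infer_instance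

-- ===== CLAIM (what is proved, stated in full; the proofs are below) =====
def Claim_equal_check_keyword_with_negation : Prop := ∀ (text : String) (keywords : List String), Dom_check_keyword_with_negation text keywords → Spec_check_keyword_with_negation text keywords (check_keyword_with_negation text keywords)

-- ===== LEMMAS AND PROOFS =====

-- A's word_positions dict, as built in port A
def pvDictOf (words : List String) : PySem.Dict Int String :=
  (PySem.List.enumerate words).foldl (fun d iw => d.insert iw.1 iw.2) PySem.Dict.empty

theorem pvEnum_fst_nodup (words : List String) :
    ((PySem.List.enumerate words).map Prod.fst).Nodup := by
  rw [show (PySem.List.enumerate words).map Prod.fst = (PySem.List.enumerate words).map (fun x => x.1) from rfl]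
  rw [PySem.List.map_fst_enumerate]
  rw [show ((0:Int) + (words.length:Int)) = ((words.length:Nat):Int) by ring]
  rw [PySem.List.pyRange_zero_natCast]
  exact (List.nodup_range).map (fun a b h => by exact_mod_cast h)

theorem pvDictOf_items (words : List String) :
    (pvDictOf words).items = PySem.List.enumerate words := by
  have h := PySem.Dict.items_foldl_insert_fresh (PySem.List.enumerate words)
    Prod.fst Prod.snd PySem.Dict.empty
    (by intro a _; simp) (pvEnum_fst_nodup words)
  simpa using h

theorem pvDictOf_keys_nodup (words : List String) :
    (pvDictOf words).keys.Nodup := by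
  show ((pvDictOf words).items.map (·.1)).Nodup
  rw [pvDictOf_items]; exact pvEnum_fst_nodup words

theorem pvDictOf_getD (words : List String) (k : Nat) (h : k < words.length) :
    (pvDictOf words).getD (k : Int) "" = words[k] := by
  apply PySem.Dict.getD_of_mem_items _ _ (pvDictOf_keys_nodup words)
  rw [pvDictOf_items, PySem.List.mem_enumerate_iff]
  exact ⟨k, h, by simp⟩

-- membership of a clamped slice, by index
theorem pvMem_slice_iff (words : List String) (a b : Nat) (w : String) :
    w ∈ PySem.List.slice words (some (a : Int)) (some (b : Int)) ↔
      ∃ j : Nat, a ≤ j ∧ j < b ∧ ∃ h : j < words.length, words[j] = w := by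
  rw [PySem.List.slice_natCast]
  constructor
  · intro hw
    rcases List.mem_iff_getElem.1 hw with ⟨i, hi, hv⟩
    have hlen : (List.take (b - a) (List.drop a words)).length = min (b - a) (words.length - a) := by
      simp
    refine ⟨a + i, by omega, by omega, by omega, ?_⟩
    · rw [← hv]
      rw [List.getElem_take, List.getElem_drop]
  · rintro ⟨j, haj, hjb, hj, hv⟩
    apply List.mem_iff_getElem.2
    refine ⟨j - a, by simp; omega, ?_⟩
    rw [List.getElem_take, List.getElem_drop]
    rw [← hv]; congr 1; omega

-- a window scan through the dict equals the scan over the slice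
theorem pvWindow_any (words : List String) (a b : Nat) (hb : b ≤ words.length)
    (f : String → Bool) :
    (PySem.List.pyRange (a : Int) (b : Int)).any (fun i => f ((pvDictOf words).getD i "")) =
      (PySem.List.slice words (some (a : Int)) (some (b : Int))).any f := by
  rw [Bool.eq_iff_iff]
  simp only [List.any_eq_true]
  constructor
  · rintro ⟨i, hi, hf⟩
    rw [PySem.List.mem_pyRange_one] at hi
    have hj : i = ((i.toNat : Nat) : Int) := by omega
    have hlt : i.toNat < words.length := by omega
    rw [hj, pvDictOf_getD words i.toNat hlt] at hf
    exact ⟨words[i.toNat], (pvMem_slice_iff words a b _).2 ⟨i.toNat, by omega, by omega, hlt, rfl⟩, hf⟩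
  · rintro ⟨w, hw, hf⟩
    rcases (pvMem_slice_iff words a b w).1 hw with ⟨j, haj, hjb, hjn, hv⟩
    refine ⟨(j : Int), PySem.List.mem_pyRange_one.2 ⟨by omega, by omega⟩, ?_⟩
    rw [pvDictOf_getD words j hjn, hv]; exact hf

theorem pvNeg_eq (words : List String) (p : Nat) (hp : p ≤ words.length) :
    pvANegCheck words (pvDictOf words) (p : Int) = pvBNegated words (p : Int) := by
  simp only [pvANegCheck, pvBNegated]
  have h3 : max 0 ((p:Int) - 3) = ((p - 3 : Nat) : Int) := by omega
  rw [h3, pvWindow_any words (p-3) p hp]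

-- B's match predicate, Nat-indexed
def pvMatch (words pat : List String) (q : Nat) : Prop :=
  PySem.List.slice words (some (q : Int)) (some ((q : Int) + (pat.length : Int))) = pat

theorem pvMatch_le (words pat : List String) (q : Nat) (hq : q ≤ words.length)
    (hm : pvMatch words pat q) : q + pat.length ≤ words.length := by
  unfold pvMatch at hm
  rw [show ((q:Int) + (pat.length:Int)) = (((q + pat.length : Nat)):Int) by push_cast; ring,
      PySem.List.slice_natCast] at hm
  have := congrArg List.length hm
  simp at this
  omega

theorem pvSlice_one (words : List String) (q : Nat) :
    PySem.List.slice words (some (q : Int)) (some ((q : Int) + 1)) =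
      if h : q < words.length then [words[q]] else [] := by
  rw [show ((q:Int) + 1) = (((q + 1 : Nat)):Int) by push_cast; ring, PySem.List.slice_natCast]
  split
  · next h =>
    rw [List.drop_eq_getElem_cons h, show q + 1 - q = 1 by omega]
    rfl
  · next h =>
    rw [List.drop_of_length_le (by omega)]
    simp

theorem pvAPositions_mem (words : List String) (kw : String) (p : Int) :
    p ∈ pvAPositions words (pvDictOf words) kw ↔
      ∃ q : Nat, p = (q : Int) ∧ q ≤ words.length ∧ pvMatch words (pvPatOf kw) q := by
  unfold pvAPositions pvPatOf
  by_cases hsp : PySem.Str.isIn " " kw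
  · simp only [if_pos hsp]
    rw [PySem.List.foldl_append_if_eq_filter, List.nil_append, List.mem_filter,
        PySem.List.mem_pyRange_one]
    constructor
    · rintro ⟨⟨h0, hlt⟩, hbeq⟩
      have hbeq' := beq_iff_eq.1 hbeq
      refine ⟨p.toNat, by omega, by omega, ?_⟩
      unfold pvMatch
      rw [show ((p.toNat : Nat) : Int) = p by omega]
      exact hbeq'
    · rintro ⟨q, rfl, hq, hm⟩
      have hle := pvMatch_le words _ q hq hm
      unfold pvMatch at hm
      exact ⟨⟨by omega, by omega⟩, beq_iff_eq.2 hm⟩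
  · simp only [if_neg hsp]
    rw [PySem.List.foldl_append_if (fun pw : Int × String => pw.2 == kw) Prod.fst,
        List.nil_append, pvDictOf_items]
    simp only [List.mem_map, List.mem_filter, PySem.List.mem_enumerate_iff]
    constructor
    · rintro ⟨x, ⟨⟨k, hk, rfl⟩, hbeq⟩, rfl⟩
      simp only at hbeq ⊢
      refine ⟨k, by omega, by omega, ?_⟩
      unfold pvMatch
      rw [show ((([kw] : List String).length : Int)) = 1 by simp, pvSlice_one]
      rw [dif_pos hk, beq_iff_eq.1 hbeq]
    · rintro ⟨q, rfl, hq, hm⟩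
      unfold pvMatch at hm
      rw [show ((([kw] : List String).length : Int)) = 1 by simp, pvSlice_one] at hm
      by_cases hlt : q < words.length
      · rw [dif_pos hlt] at hm
        refine ⟨((q : Int), words[q]), ⟨⟨q, hlt, by simp⟩, ?_⟩, rfl⟩
        simp only [beq_iff_eq]
        exact (List.cons.injEq _ _ _ _ ▸ hm).1
      · rw [dif_neg hlt] at hm
        exact absurd hm (by simp)

theorem pvCond_eq (words : List String) (keywords : List String) :
    (keywords.any (fun keyword =>
       (pvAPositions words (pvDictOf words) keyword).any
         (fun p => pvANegCheck words (pvDictOf words) p))) =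
    ((PySem.List.pyRange 0 ((words.length : Int) + 1)).any (fun p =>
       (keywords.map pvPatOf).any (fun pat =>
         PySem.List.slice words (some p) (some (p + (pat.length : Int))) == pat)
       && pvBNegated words p)) := by
  rw [Bool.eq_iff_iff]
  simp only [List.any_eq_true, List.any_map, Function.comp, Bool.and_eq_true,
    PySem.List.mem_pyRange_one, beq_iff_eq]
  constructor
  · rintro ⟨kw, hkw, p, hp, hneg⟩
    rcases (pvAPositions_mem words kw p).1 hp with ⟨q, rfl, hq, hm⟩
    refine ⟨(q : Int), ⟨by omega, by omega⟩, ⟨kw, hkw, hm⟩, ?_⟩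
    rw [← pvNeg_eq words q hq]; exact hneg
  · rintro ⟨p, ⟨h0, hlt⟩, ⟨kw, hkw, hm⟩, hneg⟩
    have hq : p = ((p.toNat : Nat) : Int) := by omega
    refine ⟨kw, hkw, p, ?_, ?_⟩
    · exact (pvAPositions_mem words kw p).2 ⟨p.toNat, hq, by omega, by rw [hq] at hm; exact hm⟩
    · rw [hq, pvNeg_eq words p.toNat (by omega)]
      rw [hq] at hneg; exact hneg

-- ===== VERDICT (by name: the statement is the Claim_ definition above) =====
theorem check_keyword_with_negation_spec : Claim_equal_check_keyword_with_negation := by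
  intro text keywords _
  unfold Spec_check_keyword_with_negation check_keyword_with_negation check_keyword_with_negation_alt
  simp only [show ∀ ws : List String,
      (List.foldl (fun (d : PySem.Dict Int String) (iw : Int × String) => d.insert iw.1 iw.2)
        PySem.Dict.empty (PySem.List.enumerate ws)) = pvDictOf ws from fun _ => rfl]
  rw [pvCond_eq]
  split_ifs <;> rfl
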